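-- pv_equiv track=rewrite | github.com/collinsakenga/codewars_solutions | 5 kyu/Escape the Mines.py | helper
-- ===== SOURCE A (Python) =====
-- movement=[(1, 0, "right"), (-1, 0, "left"), (0, 1, "down"), (0, -1, "up")]
--
-- def helper(map, cur_y, cur_x, target_y, target_x, went):
--     if cur_y==target_y and cur_x==target_x:
--         return []
--     flag=(cur_y, cur_x) in went
--     went.add((cur_y, cur_x))
--     if not flag:
--         for i,j,k in movement:
--             if valid(map, cur_y+i, cur_x+j) and map[cur_y+i][cur_x+j]==True and (cur_y+i, cur_x+j) not in went:
--                 return [k]+helper(map, cur_y+i, cur_x+j, target_y, target_x, went)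
--     return []
--
-- def valid(map, y, x):
--     if (y<0 or x<0 or y>=len(map) or x>=len(map[y])):
--         return False
--     return True
-- ===== SOURCE B (Python) =====
-- movement=[(1, 0, "right"), (-1, 0, "left"), (0, 1, "down"), (0, -1, "up")]
--
-- def helper(map, cur_y, cur_x, target_y, target_x, went):
--     # Iterative version of the same greedy single-path walk.
--     # Like A, it records visited cells into `went` (return-value equivalence).
--     res = []
--     y, x = cur_y, cur_x
--     while True:
--         if y == target_y and x == target_x:
--             return res
--         if (y, x) in went:
--             return res
--         went.add((y, x))
--         step = None
--         for i, j, k in movement: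
--             ny, nx = y + i, x + j
--             if 0 <= ny < len(map) and 0 <= nx < len(map[ny]) and map[ny][nx] and (ny, nx) not in went:
--                 step = (ny, nx, k)
--                 break
--         if step is None:
--             return res
--         ny, nx, k = step
--         res.append(k)
--         y, x = ny, nx
-- ===== Notes on version B (the rewrite author's own statement) =====
-- stated objective: simpler
-- what changed: Replaces A's non-tail recursion (building the path by prepending to each recursive result) with a single iterative while-loop that keeps the current cell and appends direction labels to an accumulator.
import Mathlib
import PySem

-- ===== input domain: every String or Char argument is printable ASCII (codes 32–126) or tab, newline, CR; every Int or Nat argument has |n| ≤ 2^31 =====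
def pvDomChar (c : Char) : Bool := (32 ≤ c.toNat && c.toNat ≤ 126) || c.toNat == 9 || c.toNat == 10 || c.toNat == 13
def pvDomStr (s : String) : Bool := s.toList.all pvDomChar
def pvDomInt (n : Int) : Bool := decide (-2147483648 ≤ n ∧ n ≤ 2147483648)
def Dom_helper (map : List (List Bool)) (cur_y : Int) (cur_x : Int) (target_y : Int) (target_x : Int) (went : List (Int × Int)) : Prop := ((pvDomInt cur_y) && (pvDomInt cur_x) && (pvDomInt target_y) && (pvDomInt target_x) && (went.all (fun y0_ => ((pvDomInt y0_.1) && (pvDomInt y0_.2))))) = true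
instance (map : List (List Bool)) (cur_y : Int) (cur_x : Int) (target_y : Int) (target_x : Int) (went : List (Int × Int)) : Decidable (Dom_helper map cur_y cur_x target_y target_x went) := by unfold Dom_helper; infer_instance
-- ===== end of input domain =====

-- B replaces A's non-tail recursion by one iterative loop with an accumulator (objective: simpler).
-- Both Pythons mutate `went` in place identically; the equivalence proved here is about the return value.

-- ===== PORT A =====
-- movement=[(1, 0, "right"), (-1, 0, "left"), (0, 1, "down"), (0, -1, "up")]
def movementA : List (Int × Int × String) := [(1, 0, "right"), (-1, 0, "left"), (0, 1, "down"), (0, -1, "up")]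

-- valid(map, y, x): bounds check. map[y] is reached only when 0 ≤ y < len(map) (short-circuit), so getD [] is exact.
def validA (map : List (List Bool)) (y : Int) (x : Int) : Bool :=
  if y < 0 ∨ x < 0 ∨ (map.length : Int) ≤ y ∨ (((PySem.List.pyGet? map y).getD []).length : Int) ≤ x then false else true

-- map[y][x]: read only under validA, so both getD defaults are unreachable (exact there).
def cellA (map : List (List Bool)) (y : Int) (x : Int) : Bool :=
  (PySem.List.pyGet? ((PySem.List.pyGet? map y).getD []) x).getD false

-- the `for i,j,k in movement` loop with its early return; `rec` is the recursive call on the remaining fuel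
def scanA (rec : Int → Int → List (Int × Int) → List String)
    (map : List (List Bool)) (cur_y cur_x : Int) (went : List (Int × Int)) :
    List (Int × Int × String) → List String
  | [] => []
  | (i, j, k) :: rest =>
      if validA map (cur_y + i) (cur_x + j) = true ∧ cellA map (cur_y + i) (cur_x + j) = true
         ∧ ¬ (cur_y + i, cur_x + j) ∈ went then
        [k] ++ rec (cur_y + i) (cur_x + j) went
      else scanA rec map cur_y cur_x went rest

-- the recursion, fuel-guarded for totality only: the Python recursion depth is at most
-- (number of grid cells) + 1, since every recursive call is on a fresh grid cell added to `went`.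
def helperFuelA (fuel : Nat) (map : List (List Bool)) (cur_y cur_x target_y target_x : Int)
    (went : List (Int × Int)) : List String :=
  match fuel with
  | 0 => []
  | fuel + 1 =>
      if cur_y = target_y ∧ cur_x = target_x then []
      else
        let flag := (cur_y, cur_x) ∈ went
        let went' := PySem.Set.add went (cur_y, cur_x)
        if flag then []
        else scanA (fun y x w => helperFuelA fuel map y x target_y target_x w) map cur_y cur_x went' movementA

def helper (map : List (List Bool)) (cur_y : Int) (cur_x : Int) (target_y : Int) (target_x : Int) (went : List (Int × Int)) : List String :=
  helperFuelA ((map.map (·.length)).sum + 2) map cur_y cur_x target_y target_x went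

-- ===== PORT B =====
def movementB : List (Int × Int × String) := [(1, 0, "right"), (-1, 0, "left"), (0, 1, "down"), (0, -1, "up")]

-- map[ny][nx], read only under the bounds test of findStepB (getD defaults unreachable, exact)
def cellB (map : List (List Bool)) (y : Int) (x : Int) : Bool :=
  (PySem.List.pyGet? ((PySem.List.pyGet? map y).getD []) x).getD false

-- the inner `for … break` that picks the first usable neighbor
def findStepB (map : List (List Bool)) (y x : Int) (went : List (Int × Int)) :
    List (Int × Int × String) → Option (Int × Int × String)
  | [] => none
  | (i, j, k) :: rest =>
      if (0 ≤ y + i ∧ y + i < (map.length : Int)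
          ∧ 0 ≤ x + j ∧ x + j < (((PySem.List.pyGet? map (y + i)).getD []).length : Int))
         ∧ cellB map (y + i) (x + j) = true ∧ ¬ (y + i, x + j) ∈ went then
        some (y + i, x + j, k)
      else findStepB map y x went rest

-- the while-loop; fuel is the same totality guard as in port A
def loopB (fuel : Nat) (map : List (List Bool)) (y x target_y target_x : Int)
    (went : List (Int × Int)) (res : List String) : List String :=
  match fuel with
  | 0 => res
  | fuel + 1 =>
      if y = target_y ∧ x = target_x then res
      else if (y, x) ∈ went then res
      else
        let went' := PySem.Set.add went (y, x)
        match findStepB map y x went' movementB with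
        | none => res
        | some (ny, nx, k) => loopB fuel map ny nx target_y target_x went' (res ++ [k])

def helper_alt (map : List (List Bool)) (cur_y : Int) (cur_x : Int) (target_y : Int) (target_x : Int) (went : List (Int × Int)) : List String :=
  loopB ((map.map (·.length)).sum + 2) map cur_y cur_x target_y target_x went []

-- ===== PRECONDITION & SPEC =====
def Spec_helper (map : List (List Bool)) (cur_y : Int) (cur_x : Int) (target_y : Int) (target_x : Int) (went : List (Int × Int)) (out : List String) : Prop := out = helper_alt map cur_y cur_x target_y target_x went
instance (map : List (List Bool)) (cur_y : Int) (cur_x : Int) (target_y : Int) (target_x : Int) (went : List (Int × Int)) (out : List String) : Decidable (Spec_helper map cur_y cur_x target_y target_x went out) := by unfold Spec_helper; infer_instance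

-- ===== CLAIM (what is proved, stated in full; the proofs are below) =====
def Claim_equal_helper : Prop := ∀ (map : List (List Bool)) (cur_y : Int) (cur_x : Int) (target_y : Int) (target_x : Int) (went : List (Int × Int)), Dom_helper map cur_y cur_x target_y target_x went → Spec_helper map cur_y cur_x target_y target_x went (helper map cur_y cur_x target_y target_x went)

-- ===== LEMMAS AND PROOFS =====

-- A's validity test equals B's bounds test
theorem validA_iff (map : List (List Bool)) (y x : Int) :
    validA map y x = true ↔
      (0 ≤ y ∧ y < (map.length : Int) ∧ 0 ≤ x ∧ x < (((PySem.List.pyGet? map y).getD []).length : Int)) := by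
  unfold validA
  split_ifs with h
  · simp; omega
  · simp; omega

-- A's scan over the movement list computes the first usable neighbor that B's findStepB picks
theorem scanA_eq (rec : Int → Int → List (Int × Int) → List String)
    (map : List (List Bool)) (y x : Int) (went : List (Int × Int))
    (moves : List (Int × Int × String)) :
    scanA rec map y x went moves =
      match findStepB map y x went moves with
      | none => []
      | some (ny, nx, k) => k :: rec ny nx went := by
  induction moves with
  | nil => rfl
  | cons m rest ih =>
      obtain ⟨i, j, k⟩ := m
      rw [scanA, findStepB]
      by_cases h : (0 ≤ y + i ∧ y + i < (map.length : Int)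
          ∧ 0 ≤ x + j ∧ x + j < (((PySem.List.pyGet? map (y + i)).getD []).length : Int))
         ∧ cellB map (y + i) (x + j) = true ∧ ¬ (y + i, x + j) ∈ went
      · rw [if_pos h, if_pos]
        · simp
        · exact ⟨(validA_iff map _ _).mpr h.1, h.2⟩
      · rw [if_neg h, if_neg, ih]
        intro hc
        exact h ⟨(validA_iff map _ _).mp hc.1, hc.2⟩

-- loop invariant: B's loop is A's recursion with the accumulator in front
theorem loopB_eq (fuel : Nat) (map : List (List Bool)) (ty tx : Int) :
    ∀ (y x : Int) (went : List (Int × Int)) (res : List String),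
      loopB fuel map y x ty tx went res = res ++ helperFuelA fuel map y x ty tx went := by
  induction fuel with
  | zero => intro y x went res; simp [loopB, helperFuelA]
  | succ fuel ih =>
      intro y x went res
      rw [loopB, helperFuelA]
      by_cases ht : y = ty ∧ x = tx
      · simp [ht]
      · rw [if_neg ht, if_neg ht]
        by_cases hm : (y, x) ∈ went
        · simp [hm]
        · simp only [hm, if_false]
          rw [scanA_eq, show movementA = movementB from rfl]
          cases hfs : findStepB map y x (PySem.Set.add went (y, x)) movementB with
          | none => simp
          | some step =>
              obtain ⟨ny, nx, k⟩ := step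
              simp only [ih]
              simp

-- ===== VERDICT (by name: the statement is the Claim_ definition above) =====
theorem helper_spec : Claim_equal_helper := by
  intro map cur_y cur_x target_y target_x went _
  unfold Spec_helper helper helper_alt
  rw [loopB_eq]
  simp
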